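-- pv_equiv track=rewrite | github.com/stefantaubert/textgrid-ipa | src/textgrid_tools/intervals/symbols_joining.py | merge_right_core
-- ===== SOURCE A (Python) =====
-- from typing import Generator, List, Optional, Set, Tuple, cast
--
-- def merge_right_core(symbols: Tuple[str, ...], merge_symbols: Set[str], ignore_merge_symbols: Set[str]) -> Tuple[Tuple[str, ...]]:
--   j = 0
--   merged_symbols = []
--   while j < len(symbols):
--     new_symbol, j = get_next_merged_right_symbol_and_index(
--       symbols, j, merge_symbols, ignore_merge_symbols)
--     merged_symbols.append(new_symbol)
--   return tuple(merged_symbols)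
--
-- def get_next_merged_right_symbol_and_index(symbols: Tuple[str, ...], j: int, merge_symbols: Set[str], ignore_merge_symbols: Set[str]) -> Tuple[str, int]:
--   new_symbol = [symbols[j]]
--   j += 1
--   if new_symbol[0] not in ignore_merge_symbols and new_symbol[0] not in merge_symbols:
--     while j < len(symbols) and symbols[j] in merge_symbols:
--       new_symbol.append(symbols[j])
--       j += 1
--   return tuple(new_symbol), j
-- ===== SOURCE B (Python) =====
-- def merge_right_core(symbols, merge_symbols, ignore_merge_symbols):
--   result = []
--   open_group = False
--   for s in symbols:
--     if open_group and s in merge_symbols: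
--       result[-1].append(s)
--     else:
--       result.append([s])
--       open_group = s not in ignore_merge_symbols and s not in merge_symbols
--   return tuple(tuple(g) for g in result)
-- ===== Notes on version B (the rewrite author's own statement) =====
-- stated objective: simpler
-- what changed: Replaced the index-driven outer while loop with a look-ahead helper by a single flat pass over the symbols that keeps an open-group flag and appends merge symbols to the last group.
import Mathlib
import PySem

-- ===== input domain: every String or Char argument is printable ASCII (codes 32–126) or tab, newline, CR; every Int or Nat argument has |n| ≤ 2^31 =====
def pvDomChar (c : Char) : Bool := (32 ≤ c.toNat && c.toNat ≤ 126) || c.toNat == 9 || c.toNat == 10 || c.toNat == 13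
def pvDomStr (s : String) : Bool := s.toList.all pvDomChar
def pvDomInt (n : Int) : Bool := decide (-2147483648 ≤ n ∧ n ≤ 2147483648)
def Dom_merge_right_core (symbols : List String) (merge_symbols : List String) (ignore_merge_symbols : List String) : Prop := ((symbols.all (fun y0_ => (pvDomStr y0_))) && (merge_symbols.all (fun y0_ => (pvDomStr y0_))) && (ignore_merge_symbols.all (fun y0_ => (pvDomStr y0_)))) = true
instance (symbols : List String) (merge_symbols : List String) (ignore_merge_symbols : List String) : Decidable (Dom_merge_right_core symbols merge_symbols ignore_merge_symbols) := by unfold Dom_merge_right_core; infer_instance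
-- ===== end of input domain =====

-- B is a simpler re-decomposition: one flat flag-driven pass instead of A's index-based outer
-- loop with a look-ahead helper; return values only (neither program mutates its arguments).

-- ===== PORT A =====
-- inner 'while j < len(symbols) and symbols[j] in merge_symbols' of the helper,
-- accumulating into new_symbol exactly as the Python appends
def pvAInner (symbols merge_symbols : List String) (acc : List String) (j : Nat) :
    List String × Nat :=
  if h : j < symbols.length ∧ merge_symbols.contains ((PySem.List.pyGet? symbols (j : Int)).getD "") then
    pvAInner symbols merge_symbols (acc ++ [(PySem.List.pyGet? symbols (j : Int)).getD ""]) (j + 1)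
  else
    (acc, j)
termination_by symbols.length - j
decreasing_by omega

-- get_next_merged_right_symbol_and_index (new_symbol[0] = symbols[j] written inline)
def pvAGetNext (symbols : List String) (j : Nat) (merge_symbols ignore_merge_symbols : List String) :
    List String × Nat :=
  if ¬ ignore_merge_symbols.contains ((PySem.List.pyGet? symbols (j : Int)).getD "")
      ∧ ¬ merge_symbols.contains ((PySem.List.pyGet? symbols (j : Int)).getD "") then
    pvAInner symbols merge_symbols [(PySem.List.pyGet? symbols (j : Int)).getD ""] (j + 1)
  else
    ([(PySem.List.pyGet? symbols (j : Int)).getD ""], j + 1)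

-- the inner while never moves the index left (needed for the outer loop's termination)
theorem pvAInner_le (symbols merge_symbols : List String) (acc : List String) (j : Nat) :
    j ≤ (pvAInner symbols merge_symbols acc j).2 := by
  induction acc, j using pvAInner.induct symbols merge_symbols with
  | case1 acc j h ih => rw [pvAInner, dif_pos h]; omega
  | case2 acc j h => rw [pvAInner, dif_neg h]

theorem pvAGetNext_lt (symbols : List String) (j : Nat) (merge_symbols ignore_merge_symbols : List String) :
    j < (pvAGetNext symbols j merge_symbols ignore_merge_symbols).2 := by
  unfold pvAGetNext
  split
  · have := pvAInner_le symbols merge_symbols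
      [(PySem.List.pyGet? symbols (j : Int)).getD ""] (j + 1)
    omega
  · simp

-- outer 'while j < len(symbols)' of merge_right_core, appending to merged_symbols
def pvAOuter (symbols merge_symbols ignore_merge_symbols : List String)
    (acc : List (List String)) (j : Nat) : List (List String) :=
  if _h : j < symbols.length then
    let r := pvAGetNext symbols j merge_symbols ignore_merge_symbols
    pvAOuter symbols merge_symbols ignore_merge_symbols (acc ++ [r.1]) r.2
  else acc
termination_by symbols.length - j
decreasing_by have := pvAGetNext_lt symbols j merge_symbols ignore_merge_symbols; omega

def merge_right_core (symbols : List String) (merge_symbols : List String) (ignore_merge_symbols : List String) : List (List String) :=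
  pvAOuter symbols merge_symbols ignore_merge_symbols [] 0

-- ===== PORT B =====
-- loop body: 'result[-1].append(s)' / 'result.append([s])'; result is kept reversed with
-- each group reversed (so both Python appends are a cons), and is put back in order at the end
def pvBStep (merge_symbols ignore_merge_symbols : List String)
    (st : List (List String) × Bool) (s : String) : List (List String) × Bool :=
  if st.2 && merge_symbols.contains s then
    (match st.1 with
     | g :: rest => (s :: g) :: rest
     | [] => [[s]], st.2)
  else
    ([s] :: st.1, !ignore_merge_symbols.contains s && !merge_symbols.contains s)

def merge_right_core_alt (symbols : List String) (merge_symbols : List String) (ignore_merge_symbols : List String) : List (List String) :=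
  ((symbols.foldl (pvBStep merge_symbols ignore_merge_symbols) ([], false)).1.reverse).map List.reverse

-- ===== PRECONDITION & SPEC =====
def Spec_merge_right_core (symbols : List String) (merge_symbols : List String) (ignore_merge_symbols : List String) (out : List (List String)) : Prop := out = merge_right_core_alt symbols merge_symbols ignore_merge_symbols
instance (symbols : List String) (merge_symbols : List String) (ignore_merge_symbols : List String) (out : List (List String)) : Decidable (Spec_merge_right_core symbols merge_symbols ignore_merge_symbols out) := by unfold Spec_merge_right_core; infer_instance

-- ===== CLAIM (what is proved, stated in full; the proofs are below) =====
def Claim_equal_merge_right_core : Prop := ∀ (symbols : List String) (merge_symbols : List String) (ignore_merge_symbols : List String), Dom_merge_right_core symbols merge_symbols ignore_merge_symbols → Spec_merge_right_core symbols merge_symbols ignore_merge_symbols (merge_right_core symbols merge_symbols ignore_merge_symbols)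

-- ===== LEMMAS AND PROOFS =====

-- common reference point: the grouping both programs compute
def pvGroups (merge_symbols ignore_merge_symbols : List String) : List String → List (List String)
  | [] => []
  | s :: rest =>
    if s ∉ ignore_merge_symbols ∧ s ∉ merge_symbols then
      (s :: rest.takeWhile merge_symbols.contains) ::
        pvGroups merge_symbols ignore_merge_symbols (rest.dropWhile merge_symbols.contains)
    else
      [s] :: pvGroups merge_symbols ignore_merge_symbols rest
termination_by l => l.length
decreasing_by
  · have := List.length_dropWhile_le (p := merge_symbols.contains) (l := rest); simp; omega
  · simp

theorem pvGroups_cons_base (merge_symbols ignore_merge_symbols : List String)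
    (s : String) (rest : List String) (hc : s ∉ ignore_merge_symbols ∧ s ∉ merge_symbols) :
    pvGroups merge_symbols ignore_merge_symbols (s :: rest) =
      (s :: rest.takeWhile merge_symbols.contains) ::
        pvGroups merge_symbols ignore_merge_symbols (rest.dropWhile merge_symbols.contains) := by
  rw [pvGroups, if_pos hc]

theorem pvGroups_cons_other (merge_symbols ignore_merge_symbols : List String)
    (s : String) (rest : List String) (hc : ¬ (s ∉ ignore_merge_symbols ∧ s ∉ merge_symbols)) :
    pvGroups merge_symbols ignore_merge_symbols (s :: rest) =
      [s] :: pvGroups merge_symbols ignore_merge_symbols rest := by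
  rw [pvGroups, if_neg hc]

theorem pvGet_eq (symbols : List String) (j : Nat) (h : j < symbols.length) :
    (PySem.List.pyGet? symbols (j : Int)).getD "" = symbols[j] := by
  simp [PySem.List.pyGet?_natCast, List.getElem?_eq_getElem h]

theorem pvDropWhile_eq_drop {α : Type} (p : α → Bool) (l : List α) :
    l.dropWhile p = l.drop (l.takeWhile p).length := by
  induction l with
  | nil => simp
  | cons a l ih =>
    by_cases hp : p a
    · simp [List.takeWhile_cons_of_pos hp, List.dropWhile_cons_of_pos hp, ih]
    · simp [List.takeWhile_cons_of_neg hp, List.dropWhile_cons_of_neg hp]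

theorem pvAInner_eq (symbols merge_symbols : List String) :
    ∀ j acc,
    pvAInner symbols merge_symbols acc j =
      (acc ++ (symbols.drop j).takeWhile merge_symbols.contains,
       j + ((symbols.drop j).takeWhile merge_symbols.contains).length) := by
  intro j
  induction hn : symbols.length - j using Nat.strong_induction_on generalizing j with
  | _ n ih =>
    intro acc
    rw [pvAInner]
    by_cases hlt : j < symbols.length
    · have hd : symbols.drop j = symbols[j] :: symbols.drop (j + 1) :=
        List.drop_eq_getElem_cons hlt
      by_cases hm : merge_symbols.contains symbols[j]
      · rw [dif_pos (by rw [pvGet_eq symbols j hlt]; exact ⟨hlt, hm⟩)]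
        rw [pvGet_eq symbols j hlt,
          ih (symbols.length - (j + 1)) (by omega) (j + 1) rfl]
        rw [hd, List.takeWhile_cons_of_pos hm]
        simp [Prod.ext_iff]
        omega
      · rw [dif_neg (by rw [pvGet_eq symbols j hlt]; exact fun h => hm h.2)]
        rw [hd, List.takeWhile_cons_of_neg hm]
        simp
    · have hnil : symbols.drop j = [] := List.drop_eq_nil_of_le (by omega)
      rw [dif_neg (by simp; omega)]
      simp [hnil]

theorem pvAOuter_eq (symbols merge_symbols ignore_merge_symbols : List String) :
    ∀ j acc, pvAOuter symbols merge_symbols ignore_merge_symbols acc j =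
      acc ++ pvGroups merge_symbols ignore_merge_symbols (symbols.drop j) := by
  intro j
  induction hn : symbols.length - j using Nat.strong_induction_on generalizing j with
  | _ n ih =>
    intro acc
    rw [pvAOuter]
    by_cases hlt : j < symbols.length
    · have hd : symbols.drop j = symbols[j] :: symbols.drop (j + 1) :=
        List.drop_eq_getElem_cons hlt
      rw [dif_pos hlt]
      unfold pvAGetNext
      rw [pvGet_eq symbols j hlt]
      by_cases hc : symbols[j] ∉ ignore_merge_symbols ∧ symbols[j] ∉ merge_symbols
      · rw [if_pos ⟨by simpa using hc.1, by simpa using hc.2⟩, pvAInner_eq]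
        have hdw : (symbols.drop (j + 1)).dropWhile merge_symbols.contains =
            symbols.drop (j + 1 + ((symbols.drop (j + 1)).takeWhile merge_symbols.contains).length) := by
          rw [pvDropWhile_eq_drop, List.drop_drop]
        rw [ih (symbols.length - (j + 1 + ((symbols.drop (j + 1)).takeWhile merge_symbols.contains).length))
          (by have := (List.takeWhile_sublist (l := symbols.drop (j+1)) merge_symbols.contains).length_le; simp at this; omega)
          _ rfl]
        rw [hd]
        rw [pvGroups_cons_base _ _ _ _ hc, ← hdw]
        simp
      · rw [if_neg (by simpa using hc)]
        rw [ih (symbols.length - (j + 1)) (by omega) (j + 1) rfl]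
        rw [hd, pvGroups_cons_other _ _ _ _ hc]
        simp
    · have hnil : symbols.drop j = [] := List.drop_eq_nil_of_le (by omega)
      rw [dif_neg hlt]
      simp [hnil, pvGroups]

theorem pvBStep_closed (merge_symbols ignore_merge_symbols : List String)
    (gs : List (List String)) (s : String) :
    pvBStep merge_symbols ignore_merge_symbols (gs, false) s =
      ([s] :: gs, !ignore_merge_symbols.contains s && !merge_symbols.contains s) := by
  simp [pvBStep]

theorem pvBStep_open (merge_symbols ignore_merge_symbols : List String)
    (gs : List (List String)) (g : List String) (s : String) :
    pvBStep merge_symbols ignore_merge_symbols (g :: gs, true) s =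
      if merge_symbols.contains s then ((s :: g) :: gs, true)
      else ([s] :: g :: gs, !ignore_merge_symbols.contains s && !merge_symbols.contains s) := by
  by_cases hv : s ∈ merge_symbols <;> simp [pvBStep, hv]

-- B's loop invariant: both states (closed group / open base group) at once
theorem pvB_inv (merge_symbols ignore_merge_symbols : List String) :
    ∀ l : List String,
      (∀ gs : List (List String),
        (((l.foldl (pvBStep merge_symbols ignore_merge_symbols) (gs, false)).1.reverse).map List.reverse
          = (gs.reverse).map List.reverse ++ pvGroups merge_symbols ignore_merge_symbols l))
      ∧ (∀ (gs : List (List String)) (g : List String),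
        (((l.foldl (pvBStep merge_symbols ignore_merge_symbols) (g :: gs, true)).1.reverse).map List.reverse
          = (gs.reverse).map List.reverse ++
            (g.reverse ++ l.takeWhile merge_symbols.contains) ::
              pvGroups merge_symbols ignore_merge_symbols (l.dropWhile merge_symbols.contains))) := by
  intro l
  induction l with
  | nil => constructor <;> intros <;> simp [pvGroups]
  | cons s l ih =>
    constructor
    · intro gs
      rw [List.foldl_cons, pvBStep_closed]
      by_cases hc : s ∉ ignore_merge_symbols ∧ s ∉ merge_symbols
      · have hb : (!ignore_merge_symbols.contains s && !merge_symbols.contains s) = true := by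
          simp [hc.1, hc.2]
        rw [hb, ih.2 gs [s], pvGroups_cons_base _ _ _ _ hc]
        simp
      · have hb : (!ignore_merge_symbols.contains s && !merge_symbols.contains s) = false := by
          by_contra h
          simp at h
          exact hc ⟨by simp [h.1], by simp [h.2]⟩
        rw [hb, ih.1 ([s] :: gs), pvGroups_cons_other _ _ _ _ hc]
        simp
    · intro gs g
      rw [List.foldl_cons, pvBStep_open]
      by_cases hm : merge_symbols.contains s
      · rw [if_pos hm, ih.2 gs (s :: g),
          List.takeWhile_cons_of_pos hm, List.dropWhile_cons_of_pos hm]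
        simp
      · rw [if_neg hm]
        by_cases hig : ignore_merge_symbols.contains s
        · have hig' : s ∈ ignore_merge_symbols := by simpa using hig
          have hb : (!ignore_merge_symbols.contains s && !merge_symbols.contains s) = false := by
            simp [hig']
          rw [hb, ih.1 ([s] :: g :: gs),
            List.takeWhile_cons_of_neg hm, List.dropWhile_cons_of_neg hm,
            pvGroups_cons_other _ _ _ _ (by intro h; exact h.1 (by simpa using hig))]
          simp
        · have hig' : s ∉ ignore_merge_symbols := by simpa using hig
          have hm' : s ∉ merge_symbols := by simpa using hm
          have hb : (!ignore_merge_symbols.contains s && !merge_symbols.contains s) = true := by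
            simp [hig', hm']
          rw [hb, ih.2 (g :: gs) [s],
            List.takeWhile_cons_of_neg hm, List.dropWhile_cons_of_neg hm,
            pvGroups_cons_base _ _ _ _ ⟨hig', hm'⟩]
          simp

-- ===== VERDICT (by name: the statement is the Claim_ definition above) =====
theorem merge_right_core_spec : Claim_equal_merge_right_core := by
  intro symbols merge_symbols ignore_merge_symbols _
  unfold Spec_merge_right_core merge_right_core merge_right_core_alt
  rw [pvAOuter_eq symbols merge_symbols ignore_merge_symbols 0 []]
  rw [(pvB_inv merge_symbols ignore_merge_symbols symbols).1 []]
  simp
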